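-- pv_equiv track=rewrite | github.com/grimaimm/testgrimaim | app/github_stats.py | find_best_day
-- ===== SOURCE A (Python) =====
-- def find_best_day(events):
--     contributions_per_day = {}
--
--     for event in events:
--         day = event['created_at'][:10]
--         if day not in contributions_per_day:
--             contributions_per_day[day] = 1
--         else:
--             contributions_per_day[day] += 1
--
--     if not contributions_per_day:
--         return None
--
--     best_day = max(contributions_per_day, key=contributions_per_day.get)
--     return contributions_per_day[best_day]
-- ===== SOURCE B (Python) =====
-- def find_best_day(events):
--     days = sorted(event['created_at'][:10] for event in events)
--     if not days:
--         return None
--     best = 1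
--     cur = 1
--     prev = days[0]
--     for d in days[1:]:
--         if d == prev:
--             cur += 1
--         else:
--             cur = 1
--         if cur > best:
--             best = cur
--         prev = d
--     return best
-- ===== Notes on version B (the rewrite author's own statement) =====
-- stated objective: alternative
-- what changed: Replaces the per-day dict counter plus max-over-keys with sorting the day strings and a single linear scan that tracks the longest run of equal consecutive days.
import Mathlib
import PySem

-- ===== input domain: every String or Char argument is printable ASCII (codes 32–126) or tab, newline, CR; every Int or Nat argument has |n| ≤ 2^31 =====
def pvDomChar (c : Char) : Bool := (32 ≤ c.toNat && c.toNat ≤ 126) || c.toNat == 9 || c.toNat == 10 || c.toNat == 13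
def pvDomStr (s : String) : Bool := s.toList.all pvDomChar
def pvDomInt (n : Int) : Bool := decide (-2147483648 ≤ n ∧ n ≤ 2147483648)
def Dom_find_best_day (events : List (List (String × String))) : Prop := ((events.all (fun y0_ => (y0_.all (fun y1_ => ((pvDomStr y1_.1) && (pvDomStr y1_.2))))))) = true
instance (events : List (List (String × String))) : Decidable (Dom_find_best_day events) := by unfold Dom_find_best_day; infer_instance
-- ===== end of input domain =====

-- B replaces A's dict counter + max-over-keys with sort-the-days + one linear scan for the longest run (alternative decomposition, not faster).

-- shared helper: event['created_at'][:10] (none = KeyError, excluded by Pre_)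
def dayOfEvent? (event : List (String × String)) : Option String :=
  ((PySem.Dict.mk event).get? "created_at").map (fun s => PySem.Str.slice s none (some 10))

-- ===== PORT A =====
-- one loop iteration of A (Option state: none once a KeyError happened)
def aStep (acc : Option (PySem.Dict String Int)) (event : List (String × String)) :
    Option (PySem.Dict String Int) :=
  match acc, dayOfEvent? event with
  | some d, some day =>
      if d.contains day = false then some (d.insert day 1)
      else some (d.insert day (d.getD day 0 + 1))
  | _, _ => none

def find_best_day (events : List (List (String × String))) : Option Int :=
  match events.foldl aStep (some PySem.Dict.empty) with
  | none => none
  | some d =>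
      if d.items = [] then none
      else
        -- max(dict, key=dict.get): the key function reads the value (present for every key)
        match PySem.List.max? d.keys (fun k => d.getD k 0) with
        | none => none
        | some best => d.get? best

-- ===== PORT B =====
def bStep (acc : Int × Int × String) (d : String) : Int × Int × String :=
  let cur : Int := if d = acc.2.2 then acc.2.1 + 1 else 1
  let best : Int := if cur > acc.1 then cur else acc.1
  (best, cur, d)

def find_best_day_alt (events : List (List (String × String))) : Option Int :=
  match events.mapM dayOfEvent? with
  | none => none
  | some raw =>
    match PySem.List.sorted raw (fun x => x) false with
    | [] => none
    | d0 :: rest => some (rest.foldl bStep (1, 1, d0)).1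

-- ===== PRECONDITION & SPEC =====
-- Pre_: every event carries the key 'created_at'; otherwise A (and B) raise KeyError.
def Pre_find_best_day (events : List (List (String × String))) : Prop :=
  (events.all (fun e => (PySem.Dict.mk e).contains "created_at")) = true
instance (events : List (List (String × String))) : Decidable (Pre_find_best_day events) := by
  unfold Pre_find_best_day; infer_instance

def pvWitness_find_best_day : (List (List (String × String))) :=
  [[("created_at", "2024-01-02T03:04:05Z")], [("created_at", "2024-01-02T09:00:00Z")]]

def Spec_find_best_day (events : List (List (String × String))) (out : Option Int) : Prop := out = find_best_day_alt events
instance (events : List (List (String × String))) (out : Option Int) : Decidable (Spec_find_best_day events out) := by unfold Spec_find_best_day; infer_instance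

-- ===== CLAIM (what is proved, stated in full; the proofs are below) =====
def Claim_equal_find_best_day : Prop := ∀ (events : List (List (String × String))), Dom_find_best_day events → Pre_find_best_day events → Spec_find_best_day events (find_best_day events)

-- ===== LEMMAS AND PROOFS =====

-- the day of an event once Pre_ guarantees the key is present
def dayOf (event : List (String × String)) : String := (dayOfEvent? event).getD ""

theorem dayOfEvent?_eq_some (e : List (String × String))
    (h : (PySem.Dict.mk e).contains "created_at" = true) :
    dayOfEvent? e = some (dayOf e) := by
  unfold dayOf dayOfEvent?
  rw [PySem.Dict.contains_eq_isSome_get?] at h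
  cases hg : (PySem.Dict.mk e).get? "created_at" with
  | none => rw [hg] at h; simp at h
  | some s => simp

theorem foldl_aStep_eq (events : List (List (String × String)))
    (hp : ∀ e ∈ events, (PySem.Dict.mk e).contains "created_at" = true)
    (d : PySem.Dict String Int) :
    events.foldl aStep (some d) =
      some ((events.map dayOf).foldl
        (fun d day => d.insert day (d.getD day 0 + 1)) d) := by
  induction events generalizing d with
  | nil => simp
  | cons e t ih =>
    have he := hp e (by simp)
    have ht : ∀ x ∈ t, (PySem.Dict.mk x).contains "created_at" = true :=
      fun x hx => hp x (by simp [hx])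
    simp only [List.foldl_cons, List.map_cons]
    rw [show aStep (some d) e = some (d.insert (dayOf e) (d.getD (dayOf e) 0 + 1)) by
      unfold aStep; rw [dayOfEvent?_eq_some e he]
      by_cases hc : d.contains (dayOf e) = true
      · simp [hc]
      · have hc' : d.contains (dayOf e) = false := by
          cases h' : d.contains (dayOf e) <;> simp_all
        rw [PySem.Dict.getD_of_not_contains d (0:Int) hc']
        simp [hc']]
    exact ih ht _

theorem mapM_dayOf (events : List (List (String × String)))
    (hp : ∀ e ∈ events, (PySem.Dict.mk e).contains "created_at" = true) :
    events.mapM dayOfEvent? = some (events.map dayOf) := by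
  induction events with
  | nil => rfl
  | cons e t ih =>
    have he := hp e (by simp)
    rw [List.mapM_cons, dayOfEvent?_eq_some e he,
      ih (fun x hx => hp x (by simp [hx]))]
    rfl

-- invariant of B's scan: after processing prefix P (nonempty, all ≤ its last-run value p),
-- best is the max multiplicity in P and is attained, cur is the multiplicity of p.
theorem count_append_singleton (P : List String) (d x : String) :
    (P ++ [d]).count x = P.count x + (if d = x then 1 else 0) := by
  simp [List.count_append, List.count_singleton]

theorem scan_inv (rest : List String) :
    ∀ (P : List String) (b c : Int) (p : String),
      (P ++ rest).Pairwise (· ≤ ·) →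
      p ∈ P → (∀ x ∈ P, x ≤ p) →
      c = (P.count p : Int) →
      (∀ x ∈ P, (P.count x : Int) ≤ b) →
      (∃ x ∈ P, b = (P.count x : Int)) →
      (∀ x ∈ P ++ rest, ((P ++ rest).count x : Int) ≤ (rest.foldl bStep (b, c, p)).1) ∧
      (∃ x ∈ P ++ rest, (rest.foldl bStep (b, c, p)).1 = ((P ++ rest).count x : Int)) := by
  induction rest with
  | nil =>
    intro P b c p _ _ _ _ hub hat
    simpa using ⟨hub, hat⟩
  | cons d rest' ih =>
    intro P b c p hsort hpP hle hc hub hat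
    have hb1 : 1 ≤ b := by
      obtain ⟨x, hx, hbx⟩ := hat
      have : 1 ≤ P.count x := List.one_le_count_iff.mpr hx
      omega
    have hpd : p ≤ d := (List.pairwise_append.mp hsort).2.2 p hpP d (by simp)
    have hassoc : P ++ d :: rest' = (P ++ [d]) ++ rest' := by simp
    by_cases hdp : d = p
    · -- run continues
      subst hdp
      have step : bStep (b, c, d) d = (max b (c + 1), c + 1, d) := by
        simp [bStep, max_def]; omega
      have hc' : c + 1 = ((P ++ [d]).count d : Int) := by
        rw [count_append_singleton]; simp [hc]
      have := ih (P ++ [d]) (max b (c + 1)) (c + 1) d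
        (by rw [← hassoc]; exact hsort)
        (by simp)
        (by intro x hx; rcases List.mem_append.mp hx with h | h
            · exact hle x h
            · simp only [List.mem_singleton] at h; exact le_of_eq h)
        hc'
        (by intro x hx
            by_cases hxd : x = d
            · subst hxd; rw [← hc']; omega
            · have hcx : ((P ++ [d]).count x : Int) = (P.count x : Int) := by
                rw [count_append_singleton]
                rw [if_neg (fun h : d = x => hxd h.symm)]; simp
              have hxP : x ∈ P := by
                rcases List.mem_append.mp hx with h | h
                · exact h
                · simp only [List.mem_singleton] at h; exact absurd h hxd
              rw [hcx]
              exact le_trans (hub x hxP) (le_max_left _ _))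
        (by rcases le_or_gt (c + 1) b with hcb | hcb
            · obtain ⟨x, hx, hbx⟩ := hat
              have hxne : x ≠ d := by
                intro hxe; subst hxe
                rw [← hc] at hbx; omega
              refine ⟨x, by simp [hx], ?_⟩
              have hcx : ((P ++ [d]).count x : Int) = (P.count x : Int) := by
                rw [count_append_singleton]
                rw [if_neg (fun h : d = x => hxne h.symm)]; simp
              rw [hcx, ← hbx]
              omega
            · refine ⟨d, by simp, ?_⟩
              rw [← hc']
              omega)
      rw [List.foldl_cons, step, hassoc]
      exact this
    · -- new run starts
      have hpd' : p < d := lt_of_le_of_ne hpd (fun h => hdp h.symm)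
      have hdP : d ∉ P := fun hdp' => absurd (hle d hdp') (not_le.mpr hpd')
      have step : bStep (b, c, p) d = (b, 1, d) := by
        simp [bStep, hdp]; omega
      have hcd : (1 : Int) = ((P ++ [d]).count d : Int) := by
        rw [count_append_singleton]
        simp [List.count_eq_zero_of_not_mem hdP]
      have := ih (P ++ [d]) b 1 d
        (by rw [← hassoc]; exact hsort)
        (by simp)
        (by intro x hx; rcases List.mem_append.mp hx with h | h
            · exact le_of_lt (lt_of_le_of_lt (hle x h) hpd')
            · simp only [List.mem_singleton] at h; exact le_of_eq h)
        hcd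
        (by intro x hx
            by_cases hxd : x = d
            · subst hxd; rw [← hcd]; omega
            · have hcx : ((P ++ [d]).count x : Int) = (P.count x : Int) := by
                rw [count_append_singleton]
                rw [if_neg (fun h : d = x => hxd h.symm)]; simp
              have hxP : x ∈ P := by
                rcases List.mem_append.mp hx with h | h
                · exact h
                · simp only [List.mem_singleton] at h; exact absurd h hxd
              rw [hcx]
              exact hub x hxP)
        (by obtain ⟨x, hx, hbx⟩ := hat
            have hxne : x ≠ d := fun hxe => hdP (hxe ▸ hx)
            refine ⟨x, by simp [hx], ?_⟩
            have hcx : ((P ++ [d]).count x : Int) = (P.count x : Int) := by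
              rw [count_append_singleton]
              rw [if_neg (fun h : d = x => hxne h.symm)]; simp
            rw [hcx, hbx])
      rw [List.foldl_cons, step, hassoc]
      exact this

-- ===== VERDICT (by name: the statement is the Claim_ definition above) =====
-- the two programs after the event loop, compared over the common day list L
theorem main_core (L : List String) :
    (if (PySem.Dict.counter L).items = [] then (none : Option Int)
     else match PySem.List.max? (PySem.Dict.counter L).keys
            (fun k => (PySem.Dict.counter L).getD k 0) with
          | none => none
          | some best => (PySem.Dict.counter L).get? best)
    = (match PySem.List.sorted L (fun x => x) false with
       | [] => none
       | d0 :: rest => some ((rest.foldl bStep (1, 1, d0)).1)) := by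
  cases hLc : L with
  | nil => simp [PySem.Dict.counter, PySem.List.sorted, PySem.Dict.empty]
  | cons a t =>
    rw [← hLc]
    have hmemL : a ∈ L := by rw [hLc]; simp
    have hitems : (PySem.Dict.counter L).items ≠ [] := by
      rw [PySem.Dict.items_counter]
      intro hnil
      have : a ∈ PySem.Set.ofList L := (PySem.Set.mem_ofList L a).mpr hmemL
      have := List.ne_nil_of_mem this
      simp_all
    rw [if_neg hitems]
    have hkeys : (PySem.Dict.counter L).keys = PySem.Set.ofList L :=
      PySem.Dict.keys_counter L
    have hkne : (PySem.Dict.counter L).keys ≠ [] := by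
      rw [hkeys]
      exact List.ne_nil_of_mem ((PySem.Set.mem_ofList L a).mpr hmemL)
    cases hmax : PySem.List.max? (PySem.Dict.counter L).keys
        (fun k => (PySem.Dict.counter L).getD k 0) with
    | none =>
      exact absurd ((PySem.List.max?_eq_none_iff _ _).mp hmax) hkne
    | some best =>
      have hbestL : best ∈ L :=
        (PySem.Set.mem_ofList L best).mp (hkeys ▸ PySem.List.max?_mem hmax)
      have hAval : (PySem.Dict.counter L).get? best = some ((L.count best : Nat) : Int) := by
        have hco : (PySem.Dict.counter L).contains best = true := by
          rw [PySem.Dict.contains_counter]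
          simpa using hbestL
        rw [PySem.Dict.contains_eq_isSome_get?] at hco
        cases hg : (PySem.Dict.counter L).get? best with
        | none => rw [hg] at hco; simp at hco
        | some v =>
          have : (PySem.Dict.counter L).getD best 0 = v :=
            PySem.Dict.getD_of_get?_eq_some _ (0:Int) hg
          rw [PySem.Dict.getD_counter] at this
          rw [← this]
      show (PySem.Dict.counter L).get? best = _
      rw [hAval]
      cases hs : PySem.List.sorted L (fun x => x) false with
      | nil =>
        exact absurd ((PySem.List.sorted_eq_nil_iff L _ false).mp hs) (by simp [hLc])
      | cons d0 t0 =>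
        have hperm : (d0 :: t0).Perm L := hs ▸ PySem.List.sorted_perm L (fun x => x) false
        have hpair : (d0 :: t0).Pairwise (· ≤ ·) := by
          have := PySem.List.sorted_pairwise L (fun x => x)
          rw [hs] at this
          exact this
        have hinv := scan_inv t0 [d0] 1 1 d0
          (by simpa using hpair)
          (by simp) (by simp) (by simp)
          (by intro x hx; simp only [List.mem_singleton] at hx
              subst hx; simp)
          ⟨d0, by simp, by simp⟩
        simp only [List.singleton_append] at hinv
        obtain ⟨hub, x0, hx0, hr⟩ := hinv
        set r := (t0.foldl bStep (1, 1, d0)).1 with hrdef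
        have hcnt : ∀ y, (d0 :: t0).count y = L.count y := fun y => hperm.count_eq y
        have h1 : ((L.count best : Nat) : Int) ≤ r := by
          have hm : best ∈ d0 :: t0 := hperm.mem_iff.mpr hbestL
          have := hub best hm
          rwa [hcnt best] at this
        have h2 : r ≤ ((L.count best : Nat) : Int) := by
          have hx0L : x0 ∈ L := hperm.subset hx0
          have := PySem.List.max?_isMax hmax x0
            (hkeys ▸ (PySem.Set.mem_ofList L x0).mpr hx0L)
          rw [PySem.Dict.getD_counter, PySem.Dict.getD_counter] at this
          rw [hr, hcnt x0]
          exact this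
        have heq : r = ((L.count best : Nat) : Int) := le_antisymm h2 h1
        show _ = some r
        rw [heq]

theorem find_best_day_spec : Claim_equal_find_best_day := by
  intro events _ hpre
  unfold Spec_find_best_day
  have hp : ∀ e ∈ events, (PySem.Dict.mk e).contains "created_at" = true := by
    intro e he
    exact List.all_eq_true.mp hpre e he
  unfold find_best_day find_best_day_alt
  rw [foldl_aStep_eq events hp PySem.Dict.empty, mapM_dayOf events hp,
    PySem.Dict.foldl_insert_getD_add_one_eq_counter]
  exact main_core (events.map dayOf)
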